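-- pv_equiv track=rewrite | github.com/KolesnikIvan/Algorithms | les_2_task_2.py | digits_counter
-- ===== SOURCE A (Python) =====
-- def digits_counter(num, even):
--     if num < 10:
--         if num % 2 == 0 and even \
--                 or num %2 != 0 and not even:
--             return 1
--         else:
--             return 0
--
--     else:
--         dgt = num % 10
--         num = num // 10
--
--         if dgt % 2 == 0 and even\
--                 or num %2 !=0 and not even:
--             return 1 + digits_counter(num, even)
--         else:
--             return digits_counter(num, even)
-- ===== SOURCE B (Python) =====
-- def digits_counter(num, even):
--     count = 0
--     while num >= 10:
--         dgt = num % 10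
--         num = num // 10
--         if dgt % 2 == 0 and even or num % 2 != 0 and not even:
--             count += 1
--     if num % 2 == 0 and even or num % 2 != 0 and not even:
--         count += 1
--     return count
-- ===== Notes on version B (the rewrite author's own statement) =====
-- stated objective: alternative
-- what changed: Replaced A's branching recursion with an iterative while-loop over the digits carrying an explicit count accumulator (same recurrence, same cost).
import Mathlib
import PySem

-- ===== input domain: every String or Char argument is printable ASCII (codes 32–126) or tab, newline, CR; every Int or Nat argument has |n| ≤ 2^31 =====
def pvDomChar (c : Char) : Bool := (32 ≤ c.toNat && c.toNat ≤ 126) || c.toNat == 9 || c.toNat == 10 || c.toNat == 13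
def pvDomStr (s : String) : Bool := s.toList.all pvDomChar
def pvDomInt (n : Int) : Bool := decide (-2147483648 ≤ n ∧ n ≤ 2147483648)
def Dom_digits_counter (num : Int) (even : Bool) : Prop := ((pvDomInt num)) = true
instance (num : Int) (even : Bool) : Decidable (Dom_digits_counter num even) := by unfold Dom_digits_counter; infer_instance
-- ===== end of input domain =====

-- B replaces A's recursion with an iterative accumulator loop (same recurrence, including A's
-- odd-branch test of the remaining num): a different decomposition, not faster.

-- ===== PORT A =====
-- literal port of A's recursion (termination measure: num.toNat)
def digits_counter (num : Int) (even : Bool) : Int :=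
  if h : num < 10 then
    if (PySem.Int.mod num 2 == 0 && even) || (PySem.Int.mod num 2 != 0 && !even) then 1 else 0
  else
    let dgt := PySem.Int.mod num 10
    let num' := PySem.Int.floordiv num 10
    if (PySem.Int.mod dgt 2 == 0 && even) || (PySem.Int.mod num' 2 != 0 && !even) then
      1 + digits_counter num' even
    else
      digits_counter num' even
termination_by num.toNat
decreasing_by
  all_goals
    simp only [PySem.Int.floordiv_eq_ediv_of_pos (by norm_num : (0:Int) < 10)]
    omega

-- ===== PORT B =====
-- the while-loop of Source B: state (num, count), returns both after the loop exits
def digitsLoop (num : Int) (even : Bool) (count : Int) : Int × Int :=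
  if h : num ≥ 10 then
    let dgt := PySem.Int.mod num 10
    let num' := PySem.Int.floordiv num 10
    let count' := if (PySem.Int.mod dgt 2 == 0 && even) || (PySem.Int.mod num' 2 != 0 && !even) then count + 1 else count
    digitsLoop num' even count'
  else
    (num, count)
termination_by num.toNat
decreasing_by
  simp only [PySem.Int.floordiv_eq_ediv_of_pos (by norm_num : (0:Int) < 10)]
  omega

def digits_counter_alt (num : Int) (even : Bool) : Int :=
  let p := digitsLoop num even 0
  if (PySem.Int.mod p.1 2 == 0 && even) || (PySem.Int.mod p.1 2 != 0 && !even) then p.2 + 1 else p.2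

-- ===== PRECONDITION & SPEC =====
def Spec_digits_counter (num : Int) (even : Bool) (out : Int) : Prop := out = digits_counter_alt num even
instance (num : Int) (even : Bool) (out : Int) : Decidable (Spec_digits_counter num even out) := by unfold Spec_digits_counter; infer_instance

-- ===== CLAIM (what is proved, stated in full; the proofs are below) =====
def Claim_equal_digits_counter : Prop := ∀ (num : Int) (even : Bool), Dom_digits_counter num even → Spec_digits_counter num even (digits_counter num even)

-- ===== LEMMAS AND PROOFS =====

-- loop invariant: running the loop from count, then doing the final test, equals count + A's result
theorem digitsLoop_invariant (num : Int) (even : Bool) (count : Int) :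
    (if (PySem.Int.mod (digitsLoop num even count).1 2 == 0 && even)
        || (PySem.Int.mod (digitsLoop num even count).1 2 != 0 && !even)
     then (digitsLoop num even count).2 + 1 else (digitsLoop num even count).2)
    = count + digits_counter num even := by
  induction num, count using digitsLoop.induct even with
  | case1 num count h dgt num' count' ih =>
      rw [digitsLoop, dif_pos h, digits_counter, dif_neg (by omega)]
      simp only [dgt, num', count', dite_eq_ite] at ih
      simp only []
      rw [ih]
      by_cases hc : ((PySem.Int.mod (PySem.Int.mod num 10) 2 == 0 && even)
          || (PySem.Int.mod (PySem.Int.floordiv num 10) 2 != 0 && !even)) = true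
      · simp only [hc, if_pos]
        ring
      · simp only [eq_false_of_ne_true hc, if_false, Bool.false_eq_true]
  | case2 num count h =>
      rw [digitsLoop, dif_neg h, digits_counter, dif_pos (by omega)]
      simp only [Bool.or_eq_true, Bool.and_eq_true, beq_iff_eq, bne_iff_ne, ne_eq,
        Bool.not_eq_eq_eq_not, Bool.not_true]
      split_ifs <;> ring

-- ===== VERDICT (by name: the statement is the Claim_ definition above) =====
theorem digits_counter_spec : Claim_equal_digits_counter := by
  intro num even _
  unfold Spec_digits_counter digits_counter_alt
  have h := digitsLoop_invariant num even 0
  simp only [zero_add] at h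
  exact h.symm
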